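-- pv_equiv track=rewrite | github.com/DavtyanDaniel/codesignal_and_leetcode | isBeautifulString.py | isBeautifulString
-- ===== SOURCE A (Python) =====
-- def isBeautifulString(inputString):
--     index = 0
--     counter = 0
--     while index < len(inputString):
--         if inputString[index] == 'a':
--             index += 1
--         else:
--             c = inputString.count(chr(ord(inputString[index])-1))
--             if c >= inputString.count(inputString[index]):
--                 counter += 1
--                 index += 1
--             else:
--                 return False
--     g = inputString.count('a')
--     if counter == (len(inputString) - g):
--         return True
-- ===== SOURCE B (Python) =====
-- def isBeautifulString(inputString):
--     freq = {}
--     for ch in inputString: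
--         freq[ch] = freq.get(ch, 0) + 1
--     for ch, n in freq.items():
--         if ch != 'a' and freq.get(chr(ord(ch) - 1), 0) < n:
--             return False
--     return True
-- ===== Notes on version B (the rewrite author's own statement) =====
-- stated objective: alternative
-- what changed: Builds a frequency table in one pass and checks the predecessor condition once per distinct character, instead of A's per-position loop that rescans the whole string with .count at every non-'a' position.
import Mathlib
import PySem

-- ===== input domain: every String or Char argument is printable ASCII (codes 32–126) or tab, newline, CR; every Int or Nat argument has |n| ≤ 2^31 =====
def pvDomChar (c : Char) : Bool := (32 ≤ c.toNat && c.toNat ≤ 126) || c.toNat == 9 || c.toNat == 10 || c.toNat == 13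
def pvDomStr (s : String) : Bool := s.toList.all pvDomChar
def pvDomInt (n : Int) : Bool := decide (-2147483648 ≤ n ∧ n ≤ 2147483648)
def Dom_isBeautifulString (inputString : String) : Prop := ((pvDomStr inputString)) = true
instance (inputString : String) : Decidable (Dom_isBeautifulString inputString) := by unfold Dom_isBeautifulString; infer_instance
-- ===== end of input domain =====

set_option maxRecDepth 4000

-- B replaces A's per-position loop with two full .count scans at each non-'a' position
-- by one frequency-table build plus a single pass over the distinct characters.


-- ===== PORT A =====
-- chr(ord(c) - 1); exact on Dom characters (codes ≥ 9, so no underflow)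
def pvPredChar (c : Char) : Char := Char.ofNat (c.toNat - 1)

-- the while loop of A, state = (index, counter)
def isBeautifulStringGo (s : List Char) (index counter : Nat) : Option Bool :=
  if h : index < s.length then
    if s[index] = 'a' then
      isBeautifulStringGo s (index + 1) counter
    else
      if s.count (pvPredChar s[index]) ≥ s.count s[index] then
        isBeautifulStringGo s (index + 1) (counter + 1)
      else
        some false
  else
    if counter = s.length - s.count 'a' then some true else none
termination_by s.length - index

def isBeautifulString (inputString : String) : Option Bool :=
  isBeautifulStringGo inputString.toList 0 0

-- ===== PORT B =====
def isBeautifulString_alt (inputString : String) : Option Bool :=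
  let freq : PySem.Dict Char Int :=
    inputString.toList.foldl (fun d ch => d.insert ch (d.getD ch 0 + 1)) PySem.Dict.empty
  if freq.items.all (fun p => p.1 == 'a' || decide (freq.getD (pvPredChar p.1) 0 ≥ p.2)) then
    some true
  else
    some false

-- ===== PRECONDITION & SPEC =====
def Spec_isBeautifulString (inputString : String) (out : Option Bool) : Prop := out = isBeautifulString_alt inputString
instance (inputString : String) (out : Option Bool) : Decidable (Spec_isBeautifulString inputString out) := by unfold Spec_isBeautifulString; infer_instance

-- ===== CLAIM (what is proved, stated in full; the proofs are below) =====
def Claim_equal_isBeautifulString : Prop := ∀ (inputString : String), Dom_isBeautifulString inputString → Spec_isBeautifulString inputString (isBeautifulString inputString)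

-- ===== LEMMAS AND PROOFS =====
-- the per-character condition both programs test
def pvOk (s : List Char) (c : Char) : Bool :=
  c == 'a' || decide (s.count (pvPredChar c) ≥ s.count c)

theorem pv_filter_len (s : List Char) :
    (s.filter (fun c => c ≠ 'a')).length = s.length - s.count 'a' := by
  have h := List.length_eq_length_filter_add (l := s) (fun c => decide (c ≠ 'a'))
  have h2 : (s.filter (fun c => !decide (c ≠ 'a'))).length = s.count 'a' := by
    rw [List.count, List.countP_eq_length_filter]
    congr 1
    refine List.filter_congr (fun c _ => by rw [Bool.beq_eq_decide_eq]; simp)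
  omega

theorem goA_eq (s : List Char) (index counter : Nat)
    (hc : counter = ((s.take index).filter (fun c => c ≠ 'a')).length) :
    isBeautifulStringGo s index counter
      = if (s.drop index).all (pvOk s) then some true else some false := by
  by_cases h : index < s.length
  · have hdrop : s.drop index = s[index] :: s.drop (index + 1) :=
      (List.getElem_cons_drop h).symm
    have htake : s.take (index + 1) = s.take index ++ [s[index]] :=
      List.take_succ_eq_append_getElem h
    rw [isBeautifulStringGo, dif_pos h]
    by_cases ha : s[index] = 'a'
    · rw [if_pos ha, goA_eq s (index + 1) counter
        (by simp [htake, List.filter_append, ha, hc])]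
      have hok : pvOk s s[index] = true := by simp [pvOk, ha]
      rw [hdrop, List.all_cons, hok, Bool.true_and]
    · rw [if_neg ha]
      by_cases hcnt : s.count (pvPredChar s[index]) ≥ s.count s[index]
      · have hc' : counter + 1 = ((s.take (index + 1)).filter (fun c => c ≠ 'a')).length := by
          rw [htake, List.filter_append, hc]
          simp [ha]
        rw [if_pos hcnt, goA_eq s (index + 1) (counter + 1) hc']
        have hok : pvOk s s[index] = true := by
          unfold pvOk
          rw [decide_eq_true hcnt, Bool.or_true]
        rw [hdrop, List.all_cons, hok, Bool.true_and]
      · rw [if_neg hcnt]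
        have hok : pvOk s s[index] = false := by
          unfold pvOk
          rw [decide_eq_false hcnt, Bool.or_false, beq_eq_false_iff_ne]
          exact ha
        rw [hdrop, List.all_cons, hok, Bool.false_and]
        rfl
  · have hge : s.length ≤ index := Nat.le_of_not_lt h
    rw [isBeautifulStringGo, dif_neg h]
    have : s.take index = s := List.take_of_length_le hge
    rw [List.drop_eq_nil_of_le hge]
    have hcc : counter = s.length - s.count 'a' := by rw [hc, this, pv_filter_len]
    simp [hcc]
termination_by s.length - index

theorem alt_eq (inputString : String) :
    isBeautifulString_alt inputString
      = if inputString.toList.all (pvOk inputString.toList) then some true else some false := by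
  unfold isBeautifulString_alt
  set s := inputString.toList
  rw [PySem.Dict.foldl_insert_getD_add_one_eq_counter]
  show (if ((PySem.Dict.counter s).items.all
      (fun p => p.1 == 'a' || decide ((PySem.Dict.counter s).getD (pvPredChar p.1) 0 ≥ p.2))) then
    some true else some false) = _
  rw [PySem.Dict.items_counter]
  have hall : ((PySem.Set.ofList s).map (fun k => (k, (s.count k : Int)))).all
        (fun p => p.1 == 'a' || decide ((PySem.Dict.counter s).getD (pvPredChar p.1) 0 ≥ p.2))
      = s.all (pvOk s) := by
    rcases Bool.eq_false_or_eq_true (((PySem.Set.ofList s).map (fun k => (k, (s.count k : Int)))).all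
      (fun p => p.1 == 'a' || decide ((PySem.Dict.counter s).getD (pvPredChar p.1) 0 ≥ p.2))) with hl | hl <;>
      rcases Bool.eq_false_or_eq_true (s.all (pvOk s)) with hr | hr <;>
        rw [hl, hr] <;> try rfl
    · exfalso
      rw [List.all_eq_true] at hl
      rw [Bool.eq_false_iff, ne_eq, List.all_eq_true] at hr
      refine hr (fun k hk => ?_)
      have := hl (k, (s.count k : Int)) (List.mem_map.mpr ⟨k, (PySem.Set.mem_ofList _ _).mpr hk, rfl⟩)
      simpa [pvOk, PySem.Dict.getD_counter, Int.ofNat_le] using this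
    · exfalso
      rw [List.all_eq_true] at hr
      rw [Bool.eq_false_iff, ne_eq, List.all_eq_true] at hl
      refine hl (fun p hp => ?_)
      obtain ⟨k, hk, rfl⟩ := List.mem_map.mp hp
      have := hr k ((PySem.Set.mem_ofList _ _).mp hk)
      simpa [pvOk, PySem.Dict.getD_counter, Int.ofNat_le] using this
  rw [hall]

-- ===== VERDICT (by name: the statement is the Claim_ definition above) =====
theorem isBeautifulString_spec : Claim_equal_isBeautifulString := by
  intro inputString _
  unfold Spec_isBeautifulString isBeautifulString
  rw [goA_eq inputString.toList 0 0 rfl, alt_eq, List.drop_zero]
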